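-- pv_equiv track=rewrite | github.com/ypizarroza90/ACM-ICPC | SPOJ/python/HOTELS.py | solve
-- ===== SOURCE A (Python) =====
-- import collections
--
-- def solve(array, K):
--     n = len(array)
--     acum = [0]
--     for x in array:
--         acum.append(acum[-1] + x)
--
--     ans = 0
--     queue = collections.deque()
--     for j, Aj in enumerate(acum):
--
--         while queue and Aj - acum[queue[0]] > K:
--             queue.popleft()
--
--         if queue and Aj - acum[queue[0]]<= K:
--             ans = max(ans,  Aj - acum[queue[0]])
--
--         queue.append(j)
--     return ans if ans != n+1 else -1
-- ===== SOURCE B (Python) =====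
-- def solve(array, K):
--     n = len(array)
--     ans = 0
--     cur = 0
--     L = 0
--     for right, x in enumerate(array):
--         cur += x
--         while L <= right and cur > K:
--             cur -= array[L]
--             L += 1
--         if L <= right:
--             ans = max(ans, cur)
--     return ans if ans != n + 1 else -1
-- ===== Notes on version B (the rewrite author's own statement) =====
-- stated objective: simpler
-- what changed: Replaced A's prefix-sum array plus deque-of-indices with a single pass over the original array maintaining only a running window sum and a left pointer (two-pointer sliding window), keeping the final 'ans == n+1 -> -1' return line as-is.
import Mathlib
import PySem

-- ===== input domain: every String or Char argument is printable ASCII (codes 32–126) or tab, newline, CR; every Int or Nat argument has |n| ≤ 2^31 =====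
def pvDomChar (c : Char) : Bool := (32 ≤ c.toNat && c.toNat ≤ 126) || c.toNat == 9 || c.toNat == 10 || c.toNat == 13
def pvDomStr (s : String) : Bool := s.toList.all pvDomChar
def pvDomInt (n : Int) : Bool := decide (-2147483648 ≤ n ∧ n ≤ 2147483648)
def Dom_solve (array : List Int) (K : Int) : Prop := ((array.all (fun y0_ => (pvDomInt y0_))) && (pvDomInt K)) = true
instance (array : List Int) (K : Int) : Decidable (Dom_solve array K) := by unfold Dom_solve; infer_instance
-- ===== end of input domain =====

-- B replaces A's prefix-sum array + deque with a single pass keeping a running window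
-- sum and a left index (two pointers); objective: simpler (same O(n) cost, no auxiliary lists).

-- ===== PORT A =====
-- acum = [0]; for x in array: acum.append(acum[-1] + x)
def acumOf (array : List Int) : List Int :=
  array.foldl (fun acc x => acc ++ [PySem.List.pyGetD acc (-1) 0 + x]) [0]

-- while queue and Aj - acum[queue[0]] > K: queue.popleft()
def popA (acum : List Int) (K Aj : Int) : List Int → List Int
  | [] => []
  | q0 :: rest =>
      if Aj - PySem.List.pyGetD acum q0 0 > K then popA acum K Aj rest else q0 :: rest

def solve (array : List Int) (K : Int) : Int :=
  let n := array.length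
  let acum := acumOf array
  let st := (PySem.List.enumerate acum 0).foldl
    (fun (st : Int × List Int) (p : Int × Int) =>
      let queue := popA acum K p.2 st.2
      let ans :=
        match queue with
        | [] => st.1
        | q0 :: _ =>
            if p.2 - PySem.List.pyGetD acum q0 0 ≤ K
            then max st.1 (p.2 - PySem.List.pyGetD acum q0 0) else st.1
      (ans, queue ++ [p.1]))
    (0, [])
  if st.1 ≠ (n : Int) + 1 then st.1 else -1

-- ===== PORT B =====
-- while L <= right and cur > K: cur -= array[L]; L += 1
-- (array[L] is always in range here, so the default-0 lookup is exact)
def shrinkB (array : List Int) (K : Int) (right : Int) (cur : Int) (L : Int) : Int × Int :=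
  if h : L ≤ right ∧ K < cur then
    shrinkB array K right (cur - PySem.List.pyGetD array L 0) (L + 1)
  else (cur, L)
termination_by (right + 1 - L).toNat
decreasing_by omega

def solve_alt (array : List Int) (K : Int) : Int :=
  let n := array.length
  let st := (PySem.List.enumerate array 0).foldl
    (fun (st : Int × Int × Int) (p : Int × Int) =>
      let cl := shrinkB array K p.1 (st.2.1 + p.2) st.2.2
      let ans := if cl.2 ≤ p.1 then max st.1 cl.1 else st.1
      (ans, cl))
    (0, 0, 0)
  if st.1 ≠ (n : Int) + 1 then st.1 else -1

-- ===== PRECONDITION & SPEC =====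
def Spec_solve (array : List Int) (K : Int) (out : Int) : Prop := out = solve_alt array K
instance (array : List Int) (K : Int) (out : Int) : Decidable (Spec_solve array K out) := by unfold Spec_solve; infer_instance

-- ===== CLAIM (what is proved, stated in full; the proofs are below) =====
def Claim_equal_solve : Prop := ∀ (array : List Int) (K : Int), Dom_solve array K → Spec_solve array K (solve array K)

-- ===== LEMMAS AND PROOFS =====

-- prefix sum S i = sum of the first i elements
def pvS (array : List Int) (i : Nat) : Int := (array.take i).sum

-- the tail of the prefix-sum list built from running sum s
def pvScan (s : Int) : List Int → List Int
  | [] => []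
  | x :: xs => (s + x) :: pvScan (s + x) xs

-- queue of A = a contiguous block of indices, as Ints
def pvIr (L len : Nat) : List Int := (List.range' L len).map (Nat.cast)

-- A's single fold step (literally the closure in `solve`)
def pvStepA (array : List Int) (K : Int) (st : Int × List Int) (p : Int × Int) : Int × List Int :=
  let queue := popA (acumOf array) K p.2 st.2
  let ans :=
    match queue with
    | [] => st.1
    | q0 :: _ =>
        if p.2 - PySem.List.pyGetD (acumOf array) q0 0 ≤ K
        then max st.1 (p.2 - PySem.List.pyGetD (acumOf array) q0 0) else st.1
  (ans, queue ++ [p.1])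

-- B's single fold step (literally the closure in `solve_alt`)
def pvStepB (array : List Int) (K : Int) (st : Int × Int × Int) (p : Int × Int) : Int × Int × Int :=
  let cl := shrinkB array K p.1 (st.2.1 + p.2) st.2.2
  let ans := if cl.2 ≤ p.1 then max st.1 cl.1 else st.1
  (ans, cl)

lemma solve_eq (array : List Int) (K : Int) :
    solve array K =
      (if ((PySem.List.enumerate (acumOf array) 0).foldl (pvStepA array K) (0, [])).1
          ≠ (array.length : Int) + 1
       then ((PySem.List.enumerate (acumOf array) 0).foldl (pvStepA array K) (0, [])).1
       else -1) := rfl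

lemma solve_alt_eq (array : List Int) (K : Int) :
    solve_alt array K =
      (if ((PySem.List.enumerate array 0).foldl (pvStepB array K) (0, 0, 0)).1
          ≠ (array.length : Int) + 1
       then ((PySem.List.enumerate array 0).foldl (pvStepB array K) (0, 0, 0)).1
       else -1) := rfl

lemma scan_len (l : List Int) : ∀ s, (pvScan s l).length = l.length := by
  induction l with
  | nil => intro s; rfl
  | cons x xs ih => intro s; simp [pvScan, ih]

lemma foldl_build (l : List Int) : ∀ (a : List Int) (s : Int) (h : a ≠ []),
    a.getLast h = s →
    l.foldl (fun acc x => acc ++ [PySem.List.pyGetD acc (-1) 0 + x]) a = a ++ pvScan s l := by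
  induction l with
  | nil => intro a s h hl; simp [pvScan]
  | cons x xs ih =>
      intro a s h hl
      have hg : PySem.List.pyGetD a (-1) 0 = s := by
        rw [PySem.List.pyGetD_neg_one a 0 h, hl]
      simp only [List.foldl_cons, hg, pvScan]
      rw [ih (a ++ [s + x]) (s + x) (by simp) (by simp)]
      simp

lemma acumOf_eq (array : List Int) : acumOf array = 0 :: pvScan 0 array := by
  simpa using foldl_build array [0] 0 (by simp) (by simp)

lemma acum_len (array : List Int) : (acumOf array).length = array.length + 1 := by
  simp [acumOf_eq, scan_len]

lemma scan_get? (l : List Int) : ∀ (s : Int) (i : Nat), i ≤ l.length →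
    (s :: pvScan s l)[i]? = some (s + (l.take i).sum) := by
  induction l with
  | nil =>
      intro s i hi
      have : i = 0 := by simpa using hi
      subst this; simp [pvScan]
  | cons x xs ih =>
      intro s i hi
      cases i with
      | zero => simp
      | succ k =>
          simp only [pvScan, List.getElem?_cons_succ]
          have := ih (s + x) k (by simpa using hi)
          simpa [add_assoc] using this

lemma acum_get? (array : List Int) (i : Nat) (hi : i ≤ array.length) :
    (acumOf array)[i]? = some (pvS array i) := by
  rw [acumOf_eq]
  simpa [pvS] using scan_get? array 0 i hi

lemma acum_pyGetD (array : List Int) (i : Nat) (hi : i ≤ array.length) :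
    PySem.List.pyGetD (acumOf array) (i : Int) 0 = pvS array i := by
  rw [PySem.List.pyGetD_natCast, List.getD_eq_getElem?_getD, acum_get? array i hi]
  rfl

lemma array_pyGetD (array : List Int) (i : Nat) (hi : i < array.length) :
    PySem.List.pyGetD array (i : Int) 0 = array[i] := by
  rw [PySem.List.pyGetD_natCast, List.getD_eq_getElem?_getD, List.getElem?_eq_getElem hi]
  rfl

lemma pvS_succ (array : List Int) (i : Nat) (hi : i < array.length) :
    pvS array (i + 1) = pvS array i + array[i] := by
  unfold pvS
  exact List.sum_take_succ array i hi

lemma pvIr_cons (L j : Nat) (h : L ≤ j) :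
    pvIr L (j + 1 - L) = (L : Int) :: pvIr (L + 1) (j - L) := by
  have h1 : j + 1 - L = (j - L) + 1 := by omega
  rw [h1, pvIr, List.range'_succ]
  simp [pvIr]

lemma pvIr_concat (L j : Nat) (h : L ≤ j + 1) :
    pvIr L (j + 1 - L) ++ [((j + 1 : Nat) : Int)] = pvIr L (j + 2 - L) := by
  have h1 : j + 2 - L = (j + 1 - L) + 1 := by omega
  have h2 : L + 1 * (j + 1 - L) = j + 1 := by omega
  rw [h1]
  show pvIr L (j+1-L) ++ _ = _
  rw [pvIr, pvIr, List.range'_concat, h2]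
  simp

lemma pop_shrink (array : List Int) (K : Int) (j : Nat) (hj : j < array.length) :
    ∀ (d L : Nat), L ≤ j + 1 → j + 1 - L ≤ d →
    ∃ L', L ≤ L' ∧ L' ≤ j + 1 ∧
      popA (acumOf array) K (pvS array (j + 1)) (pvIr L (j + 1 - L)) = pvIr L' (j + 1 - L') ∧
      shrinkB array K (j : Int) (pvS array (j + 1) - pvS array L) (L : Int)
        = (pvS array (j + 1) - pvS array L', (L' : Int)) ∧
      (L' ≤ j → pvS array (j + 1) - pvS array L' ≤ K) := by
  intro d
  induction d with
  | zero =>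
      intro L hL hd
      have hL1 : L = j + 1 := by omega
      subst hL1
      refine ⟨j + 1, le_rfl, le_rfl, ?_, ?_, by omega⟩
      · simp [pvIr, popA]
      · rw [shrinkB, dif_neg (by omega)]
  | succ d ih =>
      intro L hL hd
      by_cases hLe : L ≤ j
      · have hLn : L < array.length := by omega
        have hget := acum_pyGetD array L (by omega)
        by_cases hc : pvS array (j + 1) - pvS array L > K
        · obtain ⟨L', h1, h2, h3, h4, h5⟩ := ih (L + 1) (by omega) (by omega)
          refine ⟨L', by omega, h2, ?_, ?_, h5⟩
          · rw [pvIr_cons L j hLe]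
            simp only [popA, hget]
            rw [if_pos hc]
            have hh : j - L = j + 1 - (L + 1) := by omega
            rw [hh, h3]
          · rw [shrinkB, dif_pos ⟨by exact_mod_cast hLe, hc⟩]
            rw [array_pyGetD array L hLn]
            have hcur : pvS array (j + 1) - pvS array L - array[L]
                = pvS array (j + 1) - pvS array (L + 1) := by
              rw [pvS_succ array L hLn]; ring
            have hca : ((L : Int) + 1) = ((L + 1 : Nat) : Int) := by push_cast; ring
            rw [hcur, hca, h4]
        · refine ⟨L, le_rfl, by omega, ?_, ?_, fun _ => by omega⟩
          · rw [pvIr_cons L j hLe]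
            simp only [popA, hget]
            rw [if_neg hc, ← pvIr_cons L j hLe]
          · rw [shrinkB, dif_neg (by intro hx; exact hc hx.2)]
      · have hL1 : L = j + 1 := by omega
        subst hL1
        refine ⟨j + 1, le_rfl, le_rfl, ?_, ?_, by omega⟩
        · simp [pvIr, popA]
        · rw [shrinkB, dif_neg (by omega)]

lemma main_inv (array : List Int) (K : Int) :
    ∀ j, j ≤ array.length →
    ∃ ans L, L ≤ j ∧
      ((PySem.List.enumerate (acumOf array) 0).take (j + 1)).foldl (pvStepA array K) (0, [])
        = (ans, pvIr L (j + 1 - L)) ∧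
      ((PySem.List.enumerate array 0).take j).foldl (pvStepB array K) (0, 0, 0)
        = (ans, pvS array j - pvS array L, (L : Int)) := by
  intro j
  induction j with
  | zero =>
      intro _
      refine ⟨0, 0, le_rfl, ?_, by simp [pvS]⟩
      have e1 : (PySem.List.enumerate (acumOf array) 0).take 1 = [((0 : Int), (0 : Int))] := by
        rw [acumOf_eq, PySem.List.enumerate_cons]
        simp
      rw [e1]
      simp [pvStepA, popA, pvIr, List.range']
  | succ j ih =>
      intro hj
      obtain ⟨ans, L, hL, hA, hB⟩ := ih (by omega)
      have hjlt : j < array.length := by omega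
      obtain ⟨L', h1, h2, hpop, hshr, hle⟩ :=
        pop_shrink array K j hjlt (j + 1) L (by omega) (by omega)
      have eA : (PySem.List.enumerate (acumOf array) 0).take (j + 1 + 1)
          = (PySem.List.enumerate (acumOf array) 0).take (j + 1)
            ++ [(((j + 1 : Nat) : Int), pvS array (j + 1))] := by
        rw [List.take_add_one]
        congr 1
        rw [PySem.List.getElem?_enumerate, acum_get? array (j + 1) (by omega)]
        simp
      have eB : (PySem.List.enumerate array 0).take (j + 1)
          = (PySem.List.enumerate array 0).take j ++ [((j : Int), array[j])] := by
        rw [List.take_add_one]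
        congr 1
        rw [PySem.List.getElem?_enumerate, List.getElem?_eq_getElem hjlt]
        simp
      rw [eA, List.foldl_append, hA, eB, List.foldl_append, hB]
      simp only [List.foldl_cons, List.foldl_nil]
      have hcur : pvS array j - pvS array L + array[j] = pvS array (j + 1) - pvS array L := by
        rw [pvS_succ array j hjlt]; ring
      by_cases hcase : L' ≤ j
      · refine ⟨max ans (pvS array (j + 1) - pvS array L'), L', h2, ?_, ?_⟩
        · simp only [pvStepA, hpop, pvIr_cons L' j hcase]
          rw [acum_pyGetD array L' (by omega)]
          rw [if_pos (hle hcase)]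
          rw [← pvIr_cons L' j hcase]
          rw [pvIr_concat L' j h2]
        · simp only [pvStepB, hcur, hshr]
          rw [if_pos (by exact_mod_cast hcase)]
      · have hL1 : L' = j + 1 := by omega
        refine ⟨ans, L', h2, ?_, ?_⟩
        · simp only [pvStepA, hpop]
          subst hL1
          have h0 : j + 1 - (j + 1) = 0 := by omega
          rw [h0]
          have h1' : j + 1 + 1 - (j + 1) = 1 := by omega
          rw [h1']
          simp [pvIr, List.range']
        · simp only [pvStepB, hcur, hshr]
          rw [if_neg (by omega)]

-- ===== VERDICT (by name: the statement is the Claim_ definition above) =====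
theorem solve_spec : Claim_equal_solve := by
  intro array K _
  unfold Spec_solve
  obtain ⟨ans, L, hL, hA, hB⟩ := main_inv array K array.length le_rfl
  have lenA : (PySem.List.enumerate (acumOf array) 0).length = array.length + 1 := by
    simp [PySem.List.length_enumerate, acum_len]
  have lenB : (PySem.List.enumerate array 0).length = array.length := by
    simp [PySem.List.length_enumerate]
  rw [List.take_of_length_le (le_of_eq lenA)] at hA
  rw [List.take_of_length_le (le_of_eq lenB)] at hB
  rw [solve_eq, solve_alt_eq, hA, hB]
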